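-- pv_equiv track=rewrite | github.com/andyscpalmer/stpo-processing | stpo_processing/src/raw_post_processing.py | build_stpo_map
-- ===== SOURCE A (Python) =====
-- def build_stpo_map(separation_idexed_post_words, max_separation=20):
--     """
--     Separation to Pair Occurrences Map (STPO Map)
--
--     model = {
--         <separation: int>: {
--             <first_word: str>: {
--                 <second_word: str>: <occurrences: int>,
--                 ...
--             },
--             {...},
--             ...
--         },
--         {...},
--         ...
--     }
--     """
--     separation_to_pair_occurrences = {}
--     for separation, first_word, second_word in separation_idexed_post_words:
--         if separation < max_separation:
--             if separation not in separation_to_pair_occurrences.keys():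
--                 separation_to_pair_occurrences[separation] = {
--                     first_word: {second_word: 1}
--                 }
--             elif first_word not in separation_to_pair_occurrences[separation].keys():
--                 separation_to_pair_occurrences[separation][first_word] = {
--                     second_word: 1
--                 }
--             elif (
--                 second_word
--                 not in separation_to_pair_occurrences[separation][first_word].keys()
--             ):
--                 separation_to_pair_occurrences[separation][first_word][second_word] = 1
--             else:
--                 separation_to_pair_occurrences[separation][first_word][second_word] += 1
--
--     return separation_to_pair_occurrences
-- ===== SOURCE B (Python) =====
-- def build_stpo_map(separation_idexed_post_words, max_separation=20):
--     # One flat counting pass keyed by the whole triple, then one assembly pass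
--     # that nests the counts; dict insertion order reproduces first-occurrence order.
--     counts = {}
--     for separation, first_word, second_word in separation_idexed_post_words:
--         if separation < max_separation:
--             key = (separation, first_word, second_word)
--             counts[key] = counts.get(key, 0) + 1
--     result = {}
--     for (separation, first_word, second_word), n in counts.items():
--         result.setdefault(separation, {}).setdefault(first_word, {})[second_word] = n
--     return result
-- ===== Notes on version B (the rewrite author's own statement) =====
-- stated objective: alternative
-- what changed: Replaces A's single pass with four-way nested-membership case analysis and in-place nested updates by a flat counting pass keyed by the whole (separation, first_word, second_word) triple followed by a separate assembly pass that nests the counts; dict insertion order reproduces A's first-occurrence key order.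
import Mathlib
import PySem

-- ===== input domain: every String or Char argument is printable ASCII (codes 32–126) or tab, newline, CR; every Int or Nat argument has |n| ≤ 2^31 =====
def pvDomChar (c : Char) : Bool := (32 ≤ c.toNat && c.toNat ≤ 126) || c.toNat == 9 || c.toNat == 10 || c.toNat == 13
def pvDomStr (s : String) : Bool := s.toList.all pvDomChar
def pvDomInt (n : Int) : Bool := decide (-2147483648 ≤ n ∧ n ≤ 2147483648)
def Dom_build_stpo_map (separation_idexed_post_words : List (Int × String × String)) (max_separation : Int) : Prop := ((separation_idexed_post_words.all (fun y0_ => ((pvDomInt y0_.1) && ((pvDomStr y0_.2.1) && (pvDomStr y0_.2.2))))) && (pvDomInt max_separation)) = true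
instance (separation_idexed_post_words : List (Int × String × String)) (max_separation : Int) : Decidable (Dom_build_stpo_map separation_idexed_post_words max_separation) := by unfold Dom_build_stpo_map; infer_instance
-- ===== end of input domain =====

-- B replaces A's nested-membership case analysis by a flat triple-keyed counting
-- pass plus a separate nesting/assembly pass (objective: alternative decomposition).

-- Shared Python-dict primitives on association lists (insertion order, overwrite in place):
-- d[k] = v
def dset {κ ν : Type} [DecidableEq κ] : List (κ × ν) → κ → ν → List (κ × ν)
  | [], k, v => [(k, v)]
  | (a, b) :: r, k, v => if a = k then (k, v) :: r else (a, b) :: dset r k v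

-- d.get(k, dflt) (also models d[k] on a key known to be present)
def getd {κ ν : Type} [DecidableEq κ] : List (κ × ν) → κ → ν → ν
  | [], _, dflt => dflt
  | (a, b) :: r, k, dflt => if a = k then b else getd r k dflt

-- k in d.keys()
def hasKey {κ ν : Type} [DecidableEq κ] : List (κ × ν) → κ → Bool
  | [], _ => false
  | (a, _) :: r, k => a = k || hasKey r k

-- ===== PORT A =====
def build_stpo_map (separation_idexed_post_words : List (Int × String × String)) (max_separation : Int) : List (Int × List (String × List (String × Int))) :=
  separation_idexed_post_words.foldl (fun m t =>
    let sep := t.1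
    let fw := t.2.1
    let sw := t.2.2
    if sep < max_separation then
      if ¬ hasKey m sep then
        dset m sep [(fw, [(sw, 1)])]
      else if ¬ hasKey (getd m sep []) fw then
        dset m sep (dset (getd m sep []) fw [(sw, 1)])
      else if ¬ hasKey (getd (getd m sep []) fw []) sw then
        dset m sep (dset (getd m sep []) fw (dset (getd (getd m sep []) fw []) sw 1))
      else
        dset m sep (dset (getd m sep []) fw (dset (getd (getd m sep []) fw []) sw
          (getd (getd (getd m sep []) fw []) sw 0 + 1)))
    else m) []

-- ===== PORT B =====
-- counts[key] = counts.get(key, 0) + 1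
def cstep (c : List ((Int × String × String) × Int)) (t : Int × String × String) :
    List ((Int × String × String) × Int) :=
  dset c t (getd c t 0 + 1)

-- result.setdefault(sep, {}).setdefault(fw, {})[sw] = n
def astep (m : List (Int × List (String × List (String × Int))))
    (p : (Int × String × String) × Int) : List (Int × List (String × List (String × Int))) :=
  let s := p.1.1
  let f := p.1.2.1
  let w := p.1.2.2
  dset m s (dset (getd m s []) f (dset (getd (getd m s []) f []) w p.2))

def build_stpo_map_alt (separation_idexed_post_words : List (Int × String × String)) (max_separation : Int) : List (Int × List (String × List (String × Int))) :=
  let counts := separation_idexed_post_words.foldl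
    (fun c t => if t.1 < max_separation then cstep c t else c) []
  counts.foldl astep []

-- ===== PRECONDITION & SPEC =====
def Spec_build_stpo_map (separation_idexed_post_words : List (Int × String × String)) (max_separation : Int) (out : List (Int × List (String × List (String × Int)))) : Prop := out = build_stpo_map_alt separation_idexed_post_words max_separation
instance (separation_idexed_post_words : List (Int × String × String)) (max_separation : Int) (out : List (Int × List (String × List (String × Int)))) : Decidable (Spec_build_stpo_map separation_idexed_post_words max_separation out) := by unfold Spec_build_stpo_map; infer_instance

-- ===== CLAIM (what is proved, stated in full; the proofs are below) =====
def Claim_equal_build_stpo_map : Prop := ∀ (separation_idexed_post_words : List (Int × String × String)) (max_separation : Int), Dom_build_stpo_map separation_idexed_post_words max_separation → Spec_build_stpo_map separation_idexed_post_words max_separation (build_stpo_map separation_idexed_post_words max_separation)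

-- ===== LEMMAS AND PROOFS =====

-- proof-only abbreviations
def upd3 (m : List (Int × List (String × List (String × Int)))) (s : Int) (f w : String)
    (v : Int) : List (Int × List (String × List (String × Int))) :=
  dset m s (dset (getd m s []) f (dset (getd (getd m s []) f []) w v))

def getd3 (m : List (Int × List (String × List (String × Int)))) (s : Int) (f w : String) : Int :=
  getd (getd (getd m s []) f []) w 0

def mem3 (m : List (Int × List (String × List (String × Int)))) (s : Int) (f w : String) : Bool :=
  hasKey (getd (getd m s []) f []) w

def nbump (m : List (Int × List (String × List (String × Int)))) (s : Int) (f w : String) :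
    List (Int × List (String × List (String × Int))) :=
  upd3 m s f w (getd3 m s f w + 1)

theorem getd_dset_self {κ ν : Type} [DecidableEq κ] (d : List (κ × ν)) (k : κ) (v dflt : ν) :
    getd (dset d k v) k dflt = v := by
  induction d with
  | nil => simp [dset, getd]
  | cons hd tl ih =>
    obtain ⟨a, b⟩ := hd
    by_cases h : a = k <;> simp [dset, getd, h, ih]

theorem getd_dset_ne {κ ν : Type} [DecidableEq κ] (d : List (κ × ν)) (k k' : κ) (v dflt : ν)
    (h : k' ≠ k) : getd (dset d k v) k' dflt = getd d k' dflt := by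
  induction d with
  | nil => simp [dset, getd, Ne.symm h]
  | cons hd tl ih =>
    obtain ⟨a, b⟩ := hd
    by_cases ha : a = k
    · subst ha; simp [dset, getd, Ne.symm h]
    · by_cases ha' : a = k' <;> simp [dset, getd, ha, ha', h, ih]

theorem hasKey_dset {κ ν : Type} [DecidableEq κ] (d : List (κ × ν)) (k k' : κ) (v : ν) :
    hasKey (dset d k v) k' = (decide (k' = k) || hasKey d k') := by
  induction d with
  | nil => simp [dset, hasKey, eq_comm]
  | cons hd tl ih =>
    obtain ⟨a, b⟩ := hd
    by_cases ha : a = k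
    · by_cases h' : k' = k <;> simp [dset, hasKey, ha, h']
    · by_cases h' : k' = a
      · subst h'; simp [dset, hasKey, ha]
      · simp [dset, hasKey, ha, Ne.symm h', ih]

theorem dset_dset_self {κ ν : Type} [DecidableEq κ] (d : List (κ × ν)) (k : κ) (v v' : ν) :
    dset (dset d k v) k v' = dset d k v' := by
  induction d with
  | nil => simp [dset]
  | cons hd tl ih =>
    obtain ⟨a, b⟩ := hd
    by_cases h : a = k <;> simp [dset, h, ih]

theorem dset_comm {κ ν : Type} [DecidableEq κ] (d : List (κ × ν)) (k k' : κ) (v v' : ν)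
    (hm : hasKey d k = true) (hne : k ≠ k') :
    dset (dset d k v) k' v' = dset (dset d k' v') k v := by
  induction d with
  | nil => simp [hasKey] at hm
  | cons hd tl ih =>
    obtain ⟨a, b⟩ := hd
    by_cases ha : a = k
    · subst ha; simp [dset, hne]
    · simp [hasKey, ha] at hm
      by_cases ha' : a = k'
      · subst ha'; simp [dset, ha]
      · simp [dset, ha, ha', ih hm]

theorem getd_of_not_hasKey {κ ν : Type} [DecidableEq κ] (d : List (κ × ν)) (k : κ) (dflt : ν)
    (h : hasKey d k = false) : getd d k dflt = dflt := by
  induction d with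
  | nil => simp [getd]
  | cons hd tl ih =>
    obtain ⟨a, b⟩ := hd
    simp [hasKey] at h
    simp [getd, h.1, ih h.2]

theorem dset_of_not_hasKey {κ ν : Type} [DecidableEq κ] (d : List (κ × ν)) (k : κ) (v : ν)
    (h : hasKey d k = false) : dset d k v = d ++ [(k, v)] := by
  induction d with
  | nil => simp [dset]
  | cons hd tl ih =>
    obtain ⟨a, b⟩ := hd
    simp [hasKey] at h
    simp [dset, h.1, ih h.2]

theorem hasKey_eq_false_iff {κ ν : Type} [DecidableEq κ] (d : List (κ × ν)) (k : κ) :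
    hasKey d k = false ↔ k ∉ d.map Prod.fst := by
  induction d with
  | nil => simp [hasKey]
  | cons hd tl ih =>
    obtain ⟨a, b⟩ := hd
    simp [hasKey, ih]
    aesop

theorem keys_dset {κ ν : Type} [DecidableEq κ] (d : List (κ × ν)) (k : κ) (v : ν) :
    (dset d k v).map Prod.fst = if hasKey d k then d.map Prod.fst else d.map Prod.fst ++ [k] := by
  induction d with
  | nil => simp [dset, hasKey]
  | cons hd tl ih =>
    obtain ⟨a, b⟩ := hd
    by_cases h : a = k
    · subst h; simp [dset, hasKey]
    · by_cases h2 : hasKey tl k <;> simp [dset, hasKey, h, h2, ih]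

theorem nodup_keys_dset {κ ν : Type} [DecidableEq κ] (d : List (κ × ν)) (k : κ) (v : ν)
    (h : (d.map Prod.fst).Nodup) : ((dset d k v).map Prod.fst).Nodup := by
  rw [keys_dset]
  by_cases hk : hasKey d k = true
  · simpa [hk]
  · have hk' : hasKey d k = false := by simpa using hk
    have hnm := (hasKey_eq_false_iff d k).mp hk'
    simp only [hk', Bool.false_eq_true, if_false]
    rw [List.nodup_append]
    refine ⟨h, List.nodup_singleton _, ?_⟩
    simpa using (fun a x hx hak => hnm (List.mem_map.mpr ⟨(a, x), hx, by simp [hak]⟩) : ∀ (a : κ) (x : ν), (a, x) ∈ d → a = k → False)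

theorem mem3_hasKeys (m : List (Int × List (String × List (String × Int)))) (s : Int)
    (f w : String) (h : mem3 m s f w = true) :
    hasKey m s = true ∧ hasKey (getd m s []) f = true ∧
      hasKey (getd (getd m s []) f []) w = true := by
  unfold mem3 at h
  by_cases h1 : hasKey m s = true
  · by_cases h2 : hasKey (getd m s []) f = true
    · exact ⟨h1, h2, h⟩
    · rw [getd_of_not_hasKey (getd m s []) f [] (by simpa using h2)] at h
      simp [hasKey] at h
  · rw [getd_of_not_hasKey m s [] (by simpa using h1)] at h
    simp [getd, hasKey] at h

theorem getd3_upd3_of_ne (m : List (Int × List (String × List (String × Int))))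
    (s s' : Int) (f f' w w' : String) (v : Int) (h : (s, f, w) ≠ (s', f', w')) :
    getd3 (upd3 m s' f' w' v) s f w = getd3 m s f w := by
  unfold getd3 upd3
  by_cases hs : s = s'
  · subst hs
    rw [getd_dset_self]
    by_cases hf : f = f'
    · subst hf
      rw [getd_dset_self]
      have hw : w ≠ w' := fun e => h (by rw [e])
      rw [getd_dset_ne _ _ _ _ _ hw]
    · rw [getd_dset_ne _ _ _ _ _ hf]
  · rw [getd_dset_ne _ _ _ _ _ hs]

theorem mem3_upd3_of_ne (m : List (Int × List (String × List (String × Int))))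
    (s s' : Int) (f f' w w' : String) (v : Int) (h : (s, f, w) ≠ (s', f', w')) :
    mem3 (upd3 m s' f' w' v) s f w = mem3 m s f w := by
  unfold mem3 upd3
  by_cases hs : s = s'
  · subst hs
    rw [getd_dset_self]
    by_cases hf : f = f'
    · subst hf
      rw [getd_dset_self]
      have hw : w ≠ w' := fun e => h (by rw [e])
      rw [hasKey_dset]
      simp [hw]
    · rw [getd_dset_ne _ _ _ _ _ hf]
  · rw [getd_dset_ne _ _ _ _ _ hs]

theorem mem3_upd3_self (m : List (Int × List (String × List (String × Int))))
    (s : Int) (f w : String) (v : Int) : mem3 (upd3 m s f w v) s f w = true := by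
  unfold mem3 upd3
  rw [getd_dset_self, getd_dset_self, hasKey_dset]
  simp

theorem nbump_upd3_self (m : List (Int × List (String × List (String × Int))))
    (s : Int) (f w : String) (v : Int) :
    nbump (upd3 m s f w v) s f w = upd3 m s f w (v + 1) := by
  have g : getd3 (upd3 m s f w v) s f w = v := by
    simp [getd3, upd3, getd_dset_self]
  unfold nbump
  rw [g]
  simp [upd3, getd_dset_self, dset_dset_self]

theorem upd3_comm (m : List (Int × List (String × List (String × Int))))
    (s s' : Int) (f f' w w' : String) (v v' : Int)
    (hm : mem3 m s f w = true) (hne : (s', f', w') ≠ (s, f, w)) :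
    upd3 (upd3 m s f w v) s' f' w' v' = upd3 (upd3 m s' f' w' v') s f w v := by
  obtain ⟨h1, h2, h3⟩ := mem3_hasKeys m s f w hm
  unfold upd3
  by_cases hs : s' = s
  · subst hs
    by_cases hf : f' = f
    · subst hf
      have hw : w' ≠ w := fun e => hne (by rw [e])
      simp only [getd_dset_self, dset_dset_self]
      exact congrArg (fun z => dset m s' (dset (getd m s' []) f' z))
        (dset_comm _ _ _ _ _ h3 (Ne.symm hw))
    · simp only [getd_dset_self, dset_dset_self, getd_dset_ne _ _ _ _ _ hf,
        getd_dset_ne _ _ _ _ _ (Ne.symm hf)]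
      exact congrArg (dset m s') (dset_comm _ _ _ _ _ h2 (Ne.symm hf))
  · simp only [getd_dset_ne _ _ _ _ _ hs, getd_dset_ne _ _ _ _ _ (Ne.symm hs)]
    exact dset_comm _ _ _ _ _ h1 (Ne.symm hs)

theorem astep_eq (m : List (Int × List (String × List (String × Int))))
    (s : Int) (f w : String) (n : Int) : astep m ((s, f, w), n) = upd3 m s f w n := rfl

theorem comm_foldl (r : List ((Int × String × String) × Int))
    (m : List (Int × List (String × List (String × Int)))) (s : Int) (f w : String)
    (hm : mem3 m s f w = true) (hr : (s, f, w) ∉ r.map Prod.fst) :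
    r.foldl astep (nbump m s f w) = nbump (r.foldl astep m) s f w := by
  induction r generalizing m with
  | nil => simp
  | cons p r ih =>
    obtain ⟨⟨s', f', w'⟩, v'⟩ := p
    simp only [List.map_cons, List.mem_cons] at hr
    have hne' : (s, f, w) ≠ (s', f', w') := fun e => hr (Or.inl e)
    have hr' : (s, f, w) ∉ r.map Prod.fst := fun hx => hr (Or.inr hx)
    have hne : (s', f', w') ≠ (s, f, w) := Ne.symm hne'
    simp only [List.foldl_cons]
    have key : astep (nbump m s f w) ((s', f', w'), v') = nbump (astep m ((s', f', w'), v')) s f w := by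
      rw [astep_eq, astep_eq]
      unfold nbump
      rw [getd3_upd3_of_ne m s s' f f' w w' v' (Ne.symm hne)]
      exact upd3_comm m s s' f f' w w' _ v' hm hne
    rw [key]
    apply ih
    · rw [astep_eq, mem3_upd3_of_ne m s s' f f' w w' v' (Ne.symm hne)]
      exact hm
    · exact hr'

theorem mem3_foldl (c : List ((Int × String × String) × Int))
    (m : List (Int × List (String × List (String × Int)))) (s : Int) (f w : String)
    (h : mem3 (c.foldl astep m) s f w = true) :
    mem3 m s f w = true ∨ (s, f, w) ∈ c.map Prod.fst := by
  induction c generalizing m with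
  | nil =>
    simp only [List.foldl_nil] at h
    exact Or.inl h
  | cons p c ih =>
    obtain ⟨⟨s', f', w'⟩, v'⟩ := p
    simp only [List.foldl_cons] at h
    rcases ih _ h with h' | h'
    · by_cases he : (s, f, w) = (s', f', w')
      · right; simp [he]
      · left
        rw [astep_eq, mem3_upd3_of_ne m s s' f f' w w' v' he] at h'
        exact h'
    · right
      simp [h']

theorem crux_mem (c : List ((Int × String × String) × Int))
    (m : List (Int × List (String × List (String × Int)))) (s : Int) (f w : String)
    (hnd : (c.map Prod.fst).Nodup) (hmem : (s, f, w) ∈ c.map Prod.fst) :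
    (cstep c (s, f, w)).foldl astep m = nbump (c.foldl astep m) s f w := by
  induction c generalizing m with
  | nil => simp at hmem
  | cons p c ih =>
    obtain ⟨⟨ps, pf, pw⟩, v⟩ := p
    by_cases he : (ps, pf, pw) = (s, f, w)
    · have hc : cstep (((ps, pf, pw), v) :: c) (s, f, w) = ((s, f, w), v + 1) :: c := by
        simp [cstep, getd, dset, he]
      rw [hc]
      simp only [List.foldl_cons]
      have hnotin : (s, f, w) ∉ c.map Prod.fst := by
        rw [he] at hnd
        simp only [List.map_cons, List.nodup_cons] at hnd
        exact hnd.1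
      have hstep : astep m ((s, f, w), v + 1) = nbump (astep m ((s, f, w), v)) s f w := by
        rw [astep_eq, astep_eq, nbump_upd3_self]
      rw [hstep, he]
      rw [comm_foldl c (astep m ((s, f, w), v)) s f w ?_ hnotin]
      rw [astep_eq]
      exact mem3_upd3_self m s f w v
    · have hc : cstep (((ps, pf, pw), v) :: c) (s, f, w) = ((ps, pf, pw), v) :: cstep c (s, f, w) := by
        simp [cstep, getd, dset, he]
      rw [hc]
      simp only [List.foldl_cons]
      apply ih
      · simp only [List.map_cons, List.nodup_cons] at hnd
        exact hnd.2
      · simp only [List.map_cons, List.mem_cons] at hmem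
        rcases hmem with h | h
        · exact absurd h.symm he
        · exact h

theorem crux_new (c : List ((Int × String × String) × Int)) (s : Int) (f w : String)
    (hmem : (s, f, w) ∉ c.map Prod.fst) :
    (cstep c (s, f, w)).foldl astep [] = nbump (c.foldl astep []) s f w := by
  have hk : hasKey c (s, f, w) = false := (hasKey_eq_false_iff c (s, f, w)).mpr hmem
  have hc : cstep c (s, f, w) = c ++ [((s, f, w), 1)] := by
    unfold cstep
    rw [getd_of_not_hasKey _ _ _ hk, dset_of_not_hasKey _ _ _ hk]
    norm_num
  rw [hc, List.foldl_append]
  simp only [List.foldl_cons, List.foldl_nil]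
  have hm3 : mem3 (c.foldl astep []) s f w = false := by
    cases h : mem3 (c.foldl astep []) s f w with
    | false => rfl
    | true =>
      rcases mem3_foldl c [] s f w h with h' | h'
      · simp [mem3, getd, hasKey] at h'
      · exact absurd h' hmem
  rw [astep_eq]
  unfold nbump
  have g0 : getd3 (c.foldl astep []) s f w = 0 := by
    unfold getd3
    exact getd_of_not_hasKey _ _ _ hm3
  rw [g0]
  norm_num

theorem crux (c : List ((Int × String × String) × Int)) (s : Int) (f w : String)
    (hnd : (c.map Prod.fst).Nodup) :
    (cstep c (s, f, w)).foldl astep [] = nbump (c.foldl astep []) s f w := by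
  by_cases hmem : (s, f, w) ∈ c.map Prod.fst
  · exact crux_mem c [] s f w hnd hmem
  · exact crux_new c s f w hmem

theorem main_loop (M : Int) (l : List (Int × String × String))
    (c : List ((Int × String × String) × Int)) (hnd : (c.map Prod.fst).Nodup) :
    (l.foldl (fun c t => if t.1 < M then cstep c t else c) c).foldl astep [] =
      l.foldl (fun m t => if t.1 < M then nbump m t.1 t.2.1 t.2.2 else m) (c.foldl astep []) := by
  induction l generalizing c with
  | nil => simp
  | cons t l ih =>
    obtain ⟨s, f, w⟩ := t
    simp only [List.foldl_cons]
    by_cases hlt : s < M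
    · simp only [hlt, if_true]
      rw [ih (cstep c (s, f, w)) (nodup_keys_dset c (s, f, w) _ hnd)]
      rw [crux c s f w hnd]
    · simp only [hlt, if_false]
      exact ih c hnd

theorem stepA_eq (M : Int) :
    (fun (m : List (Int × List (String × List (String × Int)))) (t : Int × String × String) =>
      let sep := t.1
      let fw := t.2.1
      let sw := t.2.2
      if sep < M then
        if ¬ hasKey m sep then
          dset m sep [(fw, [(sw, 1)])]
        else if ¬ hasKey (getd m sep []) fw then
          dset m sep (dset (getd m sep []) fw [(sw, 1)])
        else if ¬ hasKey (getd (getd m sep []) fw []) sw then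
          dset m sep (dset (getd m sep []) fw (dset (getd (getd m sep []) fw []) sw 1))
        else
          dset m sep (dset (getd m sep []) fw (dset (getd (getd m sep []) fw []) sw
            (getd (getd (getd m sep []) fw []) sw 0 + 1)))
      else m)
    = fun m t => if t.1 < M then nbump m t.1 t.2.1 t.2.2 else m := by
  funext m t
  obtain ⟨sep, fw, sw⟩ := t
  by_cases hlt : sep < M
  · by_cases h1 : hasKey m sep = true
    · by_cases h2 : hasKey (getd m sep []) fw = true
      · by_cases h3 : hasKey (getd (getd m sep []) fw []) sw = true
        · simp [h1, h2, h3, hlt, nbump, upd3, getd3]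
        · have g : getd (getd (getd m sep []) fw []) sw 0 = 0 :=
            getd_of_not_hasKey _ _ _ (by simpa using h3)
          simp [h1, h2, h3, hlt, nbump, upd3, getd3, g]
      · have g1 : getd (getd m sep []) fw [] = [] :=
          getd_of_not_hasKey _ _ _ (by simpa using h2)
        simp [h1, h2, hlt, nbump, upd3, getd3, g1, dset, getd]
    · have g0 : getd m sep [] = [] := getd_of_not_hasKey _ _ _ (by simpa using h1)
      simp [h1, hlt, nbump, upd3, getd3, g0, dset, getd]
  · simp [hlt]

-- ===== VERDICT (by name: the statement is the Claim_ definition above) =====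
theorem build_stpo_map_spec : Claim_equal_build_stpo_map := by
  intro l M _
  unfold Spec_build_stpo_map build_stpo_map build_stpo_map_alt
  rw [stepA_eq M]
  exact (main_loop M l [] (by simp)).symm
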